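-- pv_equiv track=rewrite | github.com/efkag/dvs-depth-estimator | utils.py | infer_img_dim
-- ===== SOURCE A (Python) =====
-- def infer_img_dim(data):
--     x_max = 0
--     y_max = 0
--     for event in data:
--         if event[1] > x_max:
--             x_max = event[1]
--         if event[2] > y_max:
--             y_max = event[2]
--     return (x_max,y_max)
-- ===== SOURCE B (Python) =====
-- def _dc(events):
--     # divide-and-conquer max of columns 1 and 2 over a nonempty slice
--     if len(events) == 1:
--         e = events[0]
--         return (e[1], e[2])
--     mid = len(events) // 2
--     lx, ly = _dc(events[:mid])
--     rx, ry = _dc(events[mid:])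
--     return (max(lx, rx), max(ly, ry))
--
-- def infer_img_dim(data):
--     if not data:
--         return (0, 0)
--     x, y = _dc(data)
--     return (max(0, x), max(0, y))
-- ===== Notes on version B (the rewrite author's own statement) =====
-- stated objective: alternative
-- what changed: Replaced the single accumulator loop with a divide-and-conquer recursion that halves the event list, combines halves by componentwise max, and floors at 0 only once at the top.
import Mathlib
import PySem

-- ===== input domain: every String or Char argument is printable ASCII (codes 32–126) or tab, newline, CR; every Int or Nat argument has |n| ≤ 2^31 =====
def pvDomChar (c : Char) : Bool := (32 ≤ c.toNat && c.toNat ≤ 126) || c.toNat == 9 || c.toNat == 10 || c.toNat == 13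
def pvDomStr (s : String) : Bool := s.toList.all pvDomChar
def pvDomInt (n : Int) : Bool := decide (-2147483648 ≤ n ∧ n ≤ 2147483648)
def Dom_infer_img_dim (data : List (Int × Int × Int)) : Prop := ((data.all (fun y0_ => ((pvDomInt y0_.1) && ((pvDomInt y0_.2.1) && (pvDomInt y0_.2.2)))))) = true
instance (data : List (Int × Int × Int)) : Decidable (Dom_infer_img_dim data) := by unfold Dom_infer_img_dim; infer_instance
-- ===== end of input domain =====

-- B replaces A's single fused accumulator loop with a divide-and-conquer recursion
-- (halve the list, combine with componentwise max, floor at 0 once at the top); alternative, same cost.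


-- ===== PORT A =====
-- A: one loop over events, two accumulators updated by explicit comparisons.
def infer_img_dim (data : List (Int × Int × Int)) : Int × Int :=
  data.foldl
    (fun acc event =>
      let x_max := if event.2.1 > acc.1 then event.2.1 else acc.1
      let y_max := if event.2.2 > acc.2 then event.2.2 else acc.2
      (x_max, y_max))
    (0, 0)

-- ===== PORT B =====
-- B's helper _dc: divide-and-conquer max of columns 1 and 2 over a nonempty slice.
-- Structural recursion on a fuel = list length (a pure totalization guard: with fuel ≥ length
-- the fuel-out and [] branches are unreachable; they return (0,0)).
def dcMaxF : Nat → List (Int × Int × Int) → Int × Int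
  | _, [] => (0, 0)
  | _, [e] => (e.2.1, e.2.2)
  | 0, _ :: _ :: _ => (0, 0)
  | Nat.succ f, e1 :: e2 :: rest =>
      let l := e1 :: e2 :: rest
      let mid := l.length / 2
      let L := dcMaxF f (l.take mid)
      let R := dcMaxF f (l.drop mid)
      (max L.1 R.1, max L.2 R.2)

def dcMax (l : List (Int × Int × Int)) : Int × Int := dcMaxF l.length l

def infer_img_dim_alt (data : List (Int × Int × Int)) : Int × Int :=
  match data with
  | [] => (0, 0)
  | _ =>
      let p := dcMax data
      (max 0 p.1, max 0 p.2)

-- ===== PRECONDITION & SPEC =====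
def Spec_infer_img_dim (data : List (Int × Int × Int)) (out : Int × Int) : Prop := out = infer_img_dim_alt data
instance (data : List (Int × Int × Int)) (out : Int × Int) : Decidable (Spec_infer_img_dim data out) := by unfold Spec_infer_img_dim; infer_instance

-- ===== CLAIM (what is proved, stated in full; the proofs are below) =====
def Claim_equal_infer_img_dim : Prop := ∀ (data : List (Int × Int × Int)), Dom_infer_img_dim data → Spec_infer_img_dim data (infer_img_dim data)

-- ===== LEMMAS AND PROOFS =====

-- max of a nonempty Int list (value on [] is irrelevant/arbitrary)
def mlist : List Int → Int
  | [] => 0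
  | h :: t => t.foldl max h

theorem ite_gt_eq_max (a b : Int) : (if b > a then b else a) = max a b := by
  rw [Int.max_def]; split_ifs <;> omega

-- A's paired fold splits into two independent max folds.
theorem foldA_split (data : List (Int × Int × Int)) (x y : Int) :
    data.foldl
      (fun acc event =>
        let x_max := if event.2.1 > acc.1 then event.2.1 else acc.1
        let y_max := if event.2.2 > acc.2 then event.2.2 else acc.2
        (x_max, y_max))
      (x, y)
    = ((data.map fun e => e.2.1).foldl max x, (data.map fun e => e.2.2).foldl max y) := by
  induction data generalizing x y with
  | nil => rfl
  | cons h t ih =>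
      show List.foldl _ ((if h.2.1 > x then h.2.1 else x), (if h.2.2 > y then h.2.2 else y)) t = _
      rw [ih, ite_gt_eq_max, ite_gt_eq_max]
      simp only [List.map_cons, List.foldl_cons]

theorem foldl_max_pull (t : List Int) (c a : Int) :
    t.foldl max (max c a) = max c (t.foldl max a) := by
  induction t generalizing a with
  | nil => rfl
  | cons h s ih => simp only [List.foldl_cons, max_assoc, ih]

theorem mlist_append (a b : List Int) (ha : a ≠ []) (hb : b ≠ []) :
    mlist (a ++ b) = max (mlist a) (mlist b) := by
  match a, b with
  | h :: t, hb' :: tb =>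
      simp only [mlist, List.cons_append, List.foldl_append, List.foldl_cons]
      rw [foldl_max_pull]

theorem foldl_max_zero (xs : List Int) : xs.foldl max 0 = max 0 (mlist xs) := by
  cases xs with
  | nil => simp [mlist]
  | cons h t => simp only [mlist, List.foldl_cons, ← foldl_max_pull]

theorem dcMaxF_eq (f : Nat) (l : List (Int × Int × Int)) (hl : l ≠ []) (hf : l.length ≤ f) :
    dcMaxF f l = (mlist (l.map fun e => e.2.1), mlist (l.map fun e => e.2.2)) := by
  induction f generalizing l with
  | zero =>
      match l with
      | [e] => simp [dcMaxF, mlist]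
      | e1 :: e2 :: rest => simp at hf
  | succ f ih =>
      match l with
      | [e] => simp [dcMaxF, mlist]
      | e1 :: e2 :: rest =>
        rw [dcMaxF]
        have hlen : 1 ≤ (e1 :: e2 :: rest).length / 2 ∧
            (e1 :: e2 :: rest).length / 2 < (e1 :: e2 :: rest).length := by
          simp only [List.length_cons]; omega
        set l' := e1 :: e2 :: rest with hl'
        set mid := l'.length / 2 with hmid
        have htk : l'.take mid ≠ [] := by
          intro h
          have := congrArg List.length h
          simp only [List.length_take, List.length_nil] at this
          omega
        have hdr : l'.drop mid ≠ [] := by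
          intro h
          have := congrArg List.length h
          simp only [List.length_drop, List.length_nil] at this
          omega
        have hlc : l'.length = rest.length + 2 := by rw [hl']; simp
        have hfl : l'.length ≤ f + 1 := hf
        have hftk : (l'.take mid).length ≤ f := by
          simp only [List.length_take]; omega
        have hfdr : (l'.drop mid).length ≤ f := by
          simp only [List.length_drop]; omega
        rw [ih (l'.take mid) htk hftk, ih (l'.drop mid) hdr hfdr]
        have hmap1 : ¬ (l'.take mid).map (fun e => e.2.1) = [] := by simpa using htk
        have hmap2 : ¬ (l'.take mid).map (fun e => e.2.2) = [] := by simpa using htk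
        have hmap3 : ¬ (l'.drop mid).map (fun e => e.2.1) = [] := by simpa using hdr
        have hmap4 : ¬ (l'.drop mid).map (fun e => e.2.2) = [] := by simpa using hdr
        have h1 := mlist_append _ _ hmap1 hmap3
        have h2 := mlist_append _ _ hmap2 hmap4
        rw [← List.map_append, List.take_append_drop] at h1 h2
        simp only [h1, h2]

theorem dcMax_eq (l : List (Int × Int × Int)) (hl : l ≠ []) :
    dcMax l = (mlist (l.map fun e => e.2.1), mlist (l.map fun e => e.2.2)) :=
  dcMaxF_eq l.length l hl le_rfl

-- ===== VERDICT (by name: the statement is the Claim_ definition above) =====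
theorem infer_img_dim_spec : Claim_equal_infer_img_dim := by
  intro data _
  unfold Spec_infer_img_dim infer_img_dim infer_img_dim_alt
  rw [foldA_split]
  cases data with
  | nil => rfl
  | cons h t =>
      rw [dcMax_eq (h :: t) (by simp)]
      simp only [foldl_max_zero]
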